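-- pv_equiv track=rewrite | github.com/hardwell0101/algebraic-earnability-benchmarks | groups/S6/identity_test.py | free_reduce
-- ===== SOURCE A (Python) =====
-- from typing import List, Union
--
-- def free_reduce(indices: List[int]) -> List[int]:
--     """Cancel adjacent duplicates."""
--     if not indices:
--         return []
--
--     stack = []
--     for idx in indices:
--         if stack and stack[-1] == idx:
--             stack.pop()
--         else:
--             stack.append(idx)
--
--     return stack
-- ===== SOURCE B (Python) =====
-- def free_reduce(indices):
--     """Cancel adjacent duplicates by repeatedly removing the first adjacent
--     equal pair until a full scan finds none (confluent, same normal form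
--     as a stack pass). Does not mutate the caller's list."""
--     cur = list(indices)
--     changed = True
--     while changed:
--         changed = False
--         for i in range(len(cur) - 1):
--             if cur[i] == cur[i + 1]:
--                 del cur[i:i + 2]
--                 changed = True
--                 break
--     return cur
-- ===== Notes on version B (the rewrite author's own statement) =====
-- stated objective: alternative
-- what changed: Replaces the single stack pass with naive iterated pair-removal: repeatedly scan for the first adjacent equal pair and delete it until a pass finds none; cancellation is confluent so the normal form is the same.
import Mathlib
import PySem

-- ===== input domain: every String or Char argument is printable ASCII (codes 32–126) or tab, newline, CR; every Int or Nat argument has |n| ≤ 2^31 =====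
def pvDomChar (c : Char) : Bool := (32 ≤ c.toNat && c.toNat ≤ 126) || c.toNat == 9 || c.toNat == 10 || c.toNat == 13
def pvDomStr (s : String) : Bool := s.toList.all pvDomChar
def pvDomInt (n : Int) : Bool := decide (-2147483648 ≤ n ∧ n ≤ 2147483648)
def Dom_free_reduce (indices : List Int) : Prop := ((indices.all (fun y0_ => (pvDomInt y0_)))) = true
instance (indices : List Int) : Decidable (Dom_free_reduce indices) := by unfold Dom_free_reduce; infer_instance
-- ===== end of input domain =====

-- B replaces A's single stack pass by iterated removal of the first adjacent equal pair (alternative algorithm, not faster).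

-- ===== PORT A =====
-- one iteration of A's for-loop: pop if the stack top equals idx, else append
def pvStep (stack : List Int) (idx : Int) : List Int :=
  if stack ≠ [] ∧ stack.getLast? = some idx then stack.dropLast else stack ++ [idx]

def free_reduce (indices : List Int) : List Int :=
  if indices = [] then [] else indices.foldl pvStep []

-- ===== PORT B =====
-- the inner `for` scan of Source B: find the first i with cur[i] == cur[i+1], delete both; none if no pair
def pvRmPair : List Int → Option (List Int)
  | a :: b :: rest => if a = b then some rest else (pvRmPair (b :: rest)).map (a :: ·)
  | _ => none

-- termination measure for the while-loop: each removal shortens the list by 2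
theorem pvRmPair_length : ∀ {l l' : List Int}, pvRmPair l = some l' → l'.length + 2 = l.length := by
  intro l
  induction l with
  | nil => intro l' h; simp [pvRmPair] at h
  | cons a t ih =>
    intro l' h
    match t with
    | [] => simp [pvRmPair] at h
    | b :: rest =>
      simp only [pvRmPair] at h
      split at h
      · cases h; simp
      · match hr : pvRmPair (b :: rest) with
        | none => rw [hr] at h; simp at h
        | some m =>
          rw [hr] at h
          simp at h
          subst h
          have := ih hr
          simp at this ⊢
          omega

-- the outer `while changed` loop of Source B
def pvLoop (cur : List Int) : List Int :=
  match h : pvRmPair cur with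
  | some cur' => pvLoop cur'
  | none => cur
termination_by cur.length
decreasing_by have := pvRmPair_length h; omega

def free_reduce_alt (indices : List Int) : List Int := pvLoop indices

-- ===== PRECONDITION & SPEC =====
def Spec_free_reduce (indices : List Int) (out : List Int) : Prop := out = free_reduce_alt indices
instance (indices : List Int) (out : List Int) : Decidable (Spec_free_reduce indices out) := by unfold Spec_free_reduce; infer_instance

-- ===== CLAIM (what is proved, stated in full; the proofs are below) =====
def Claim_equal_free_reduce : Prop := ∀ (indices : List Int), Dom_free_reduce indices → Spec_free_reduce indices (free_reduce indices)

-- ===== LEMMAS AND PROOFS =====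

-- a "reduced" list: no two adjacent elements are equal
def pvRed (l : List Int) : Prop := l.IsChain (· ≠ ·)

theorem pvRed_step {s : List Int} (hs : pvRed s) (a : Int) : pvRed (pvStep s a) := by
  unfold pvStep
  split
  · exact List.IsChain.prefix hs (List.dropLast_prefix s)
  · rename_i h
    refine List.IsChain.append hs (List.isChain_singleton a) ?_
    intro x hx y hy
    simp at hy; subst hy
    intro hxy; subst hxy
    exact h ⟨by rintro rfl; simp at hx, hx⟩

theorem pvRed_foldl {l s : List Int} (hs : pvRed s) : pvRed (l.foldl pvStep s) := by
  induction l generalizing s with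
  | nil => exact hs
  | cons a t ih => exact ih (pvRed_step hs a)

-- two consecutive equal inputs leave a reduced stack unchanged
theorem pvStep_step {s : List Int} (hs : pvRed s) (b : Int) : pvStep (pvStep s b) b = s := by
  unfold pvStep
  split
  · rename_i h
    obtain ⟨hne, hlast⟩ := h
    have hlb : s.getLast hne = b := by
      rw [List.getLast?_eq_some_getLast hne] at hlast
      exact Option.some_inj.1 hlast
    have hrec : s.dropLast ++ [b] = s := by rw [← hlb]; exact List.dropLast_append_getLast hne
    by_cases hd : s.dropLast = []
    · rw [if_neg (by intro hc; exact hc.1 hd)]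
      rw [hd]; rw [hd] at hrec; simpa using hrec
    · have hne2 : s.dropLast.getLast? ≠ some b := by
        intro hc
        rw [List.getLast?_eq_some_getLast hd] at hc
        have hgb : s.dropLast.getLast hd = b := Option.some_inj.1 hc
        -- the last two elements of s are equal, contradicting pvRed s
        have hchain : pvRed (s.dropLast ++ [b]) := by rw [hrec]; exact hs
        have h3 := (List.isChain_append.1 hchain).2.2
        exact h3 (s.dropLast.getLast hd) (List.getLast?_eq_some_getLast hd ▸ rfl) b rfl (by rw [hgb])
      rw [if_neg (by intro hc; exact hne2 hc.2)]
      exact hrec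
  · rename_i h
    rw [if_pos ⟨by simp, by simp⟩]
    simp

-- removing an adjacent equal pair does not change A's fold
theorem pvFold_remove_pair (u v : List Int) (b : Int) :
    (u ++ b :: b :: v).foldl pvStep [] = (u ++ v).foldl pvStep [] := by
  have hred : pvRed (u.foldl pvStep []) := pvRed_foldl List.isChain_nil
  rw [List.foldl_append, List.foldl_append]
  simp only [List.foldl_cons]
  rw [pvStep_step hred b]

-- pvRmPair finds exactly such a decomposition
theorem pvRmPair_decomp : ∀ {l l' : List Int}, pvRmPair l = some l' →
    ∃ u b v, l = u ++ b :: b :: v ∧ l' = u ++ v := by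
  intro l
  induction l with
  | nil => intro l' h; simp [pvRmPair] at h
  | cons a t ih =>
    intro l' h
    match t with
    | [] => simp [pvRmPair] at h
    | b :: rest =>
      simp only [pvRmPair] at h
      split at h
      · rename_i hab
        obtain rfl : rest = l' := by injection h
        exact ⟨[], b, rest, by simp [hab], by simp⟩
      · match hr : pvRmPair (b :: rest) with
        | none => rw [hr] at h; simp at h
        | some m =>
          rw [hr] at h; simp at h; subst h
          obtain ⟨u, c, v, h1, h2⟩ := ih hr
          exact ⟨a :: u, c, v, by simp [h1], by simp [h2]⟩

-- if no adjacent pair exists the list is reduced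
theorem pvRmPair_none_red : ∀ {l : List Int}, pvRmPair l = none → pvRed l := by
  intro l
  induction l with
  | nil => intro _; exact List.isChain_nil
  | cons a t ih =>
    intro h
    match t with
    | [] => exact List.isChain_singleton a
    | b :: rest =>
      simp only [pvRmPair] at h
      split at h
      · simp at h
      · rename_i hab
        match hr : pvRmPair (b :: rest) with
        | some m => rw [hr] at h; simp at h
        | none =>
          have := ih hr
          exact List.isChain_cons_cons.2 ⟨hab, this⟩

-- A's fold leaves a reduced list alone
theorem pvFold_red {l s : List Int} (h : pvRed (s ++ l)) : l.foldl pvStep s = s ++ l := by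
  induction l generalizing s with
  | nil => simp
  | cons a t ih =>
    simp only [List.foldl_cons]
    have hstep : pvStep s a = s ++ [a] := by
      unfold pvStep
      rw [if_neg]
      intro ⟨hne, hlast⟩
      have hsplit : s ++ a :: t = (s ++ [a]) ++ t := by simp
      rw [pvRed, hsplit] at h
      have h3 := (List.isChain_append.1 ((List.isChain_append.1 h).1)).2.2
      rw [List.getLast?_eq_some_getLast hne] at hlast
      exact h3 (s.getLast hne) (List.getLast?_eq_some_getLast hne ▸ rfl) a rfl
        (Option.some_inj.1 hlast)
    rw [hstep]
    have := ih (s := s ++ [a]) (by simpa using h)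
    simpa using this

-- A's fold equals B's loop result
theorem pvFold_eq_loop (l : List Int) : l.foldl pvStep [] = pvLoop l := by
  induction l using pvLoop.induct with
  | case1 cur cur' h ih =>
    rw [pvLoop, h]
    obtain ⟨u, b, v, h1, h2⟩ := pvRmPair_decomp h
    rw [h1, h2, pvFold_remove_pair, ← h2]
    exact ih
  | case2 cur h =>
    rw [pvLoop, h]
    have := pvRmPair_none_red h
    simpa using pvFold_red (s := []) (by simpa using this)

-- ===== VERDICT (by name: the statement is the Claim_ definition above) =====
theorem free_reduce_spec : Claim_equal_free_reduce := by
  intro indices _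
  unfold Spec_free_reduce free_reduce free_reduce_alt
  split
  · rename_i h; subst h; rw [← pvFold_eq_loop]; rfl
  · exact pvFold_eq_loop indices
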